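-- pv_equiv track=rewrite | github.com/mosdef-hub/foyer | foyer/smarts.py | next_branch
-- ===== SOURCE A (Python) =====
-- def next_branch(tokens):
--     """Find the next branch in a list of tokens.
--
--     Parameters
--     ----------
--     tokens : list of str
--         The tokens to find the next branch in.
--
--     Returns
--     -------
--     branch : list of str
--         The next branch with parentheses stripped if necessary.
--     len_branch : int
--         The number of tokens in the branch.
--     """
--     if not tokens:
--         return [], 0
--
--     if tokens[0] != '(':
--         return tokens, len(tokens)
--     else:
--         in_branch = 1
--         branch = []
--         for t in tokens[1:]:
--             if t == '(':
--                 in_branch += 1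
--             elif t == ')':
--                 in_branch -= 1
--                 if in_branch == 0:
--                     return branch, len(branch) + 2
--             else:
--                 branch.append(t)
--     raise SyntaxError("Unbalanced parentheses")
-- ===== SOURCE B (Python) =====
-- def _parse_group(tokens, i):
--     """Recursive-descent: parse the group whose '(' is at index i-1.
--     Returns (flattened non-paren contents, index just past the matching ')').
--     Nested groups are handled by recursion on nesting depth."""
--     out = []
--     while i < len(tokens):
--         t = tokens[i]
--         if t == ')':
--             return out, i + 1
--         if t == '(':
--             sub, i = _parse_group(tokens, i + 1)
--             out += sub
--         else:
--             out.append(t)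
--             i += 1
--     raise SyntaxError("Unbalanced parentheses")
--
--
-- def next_branch(tokens):
--     """Find the next branch in a list of tokens (recursive-descent parse)."""
--     if not tokens:
--         return [], 0
--     if tokens[0] != '(':
--         return tokens, len(tokens)
--     branch, _ = _parse_group(tokens, 1)
--     return branch, len(branch) + 2
-- ===== Notes on version B (the rewrite author's own statement) =====
-- stated objective: alternative
-- what changed: B replaces A's single iterative scan with an integer depth counter by a recursive-descent parser: a helper recurses once per nesting level, each level consuming its own tokens and splicing the flattened contents of nested groups returned by the recursive call.
import Mathlib
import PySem

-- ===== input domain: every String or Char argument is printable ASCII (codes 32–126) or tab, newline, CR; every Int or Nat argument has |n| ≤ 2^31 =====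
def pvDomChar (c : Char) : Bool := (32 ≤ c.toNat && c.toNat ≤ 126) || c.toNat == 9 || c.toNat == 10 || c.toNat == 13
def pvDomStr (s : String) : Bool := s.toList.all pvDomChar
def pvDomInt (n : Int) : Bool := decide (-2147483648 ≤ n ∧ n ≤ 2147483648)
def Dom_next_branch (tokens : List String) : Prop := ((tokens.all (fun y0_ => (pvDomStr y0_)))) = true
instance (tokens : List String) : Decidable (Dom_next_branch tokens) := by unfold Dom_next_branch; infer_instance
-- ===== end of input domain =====

-- B replaces A's iterative depth-counter scan by a recursive-descent parser
-- (one recursive call per nesting level); same result, 'alternative' objective.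


-- ===== PORT A =====
-- A's loop over tokens[1:] with state (in_branch, branch); 'none' = the final
-- 'raise SyntaxError' (excluded by Pre_next_branch).
def nbLoopA : List String → Int → List String → Option (List String × Int)
  | [], _, _ => none
  | t :: rest, inb, branch =>
    if t = "(" then nbLoopA rest (inb + 1) branch
    else if t = ")" then
      if inb - 1 = 0 then some (branch, (branch.length : Int) + 2)
      else nbLoopA rest (inb - 1) branch
    else nbLoopA rest inb (branch ++ [t])

def next_branch (tokens : List String) : List String × Int :=
  match tokens with
  | [] => ([], 0)
  | t0 :: rest =>
    if t0 ≠ "(" then (tokens, (tokens.length : Int))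
    else (nbLoopA rest 1 []).getD ([], 0)   -- none = SyntaxError, outside Pre_

-- ===== PORT B =====
-- Source B's _parse_group: the while loop becomes structural recursion on the
-- remaining suffix; the recursive call for a nested group stays a recursive
-- call (fuel only makes the nested call terminate; it is never exhausted when
-- fuel ≥ length of the suffix, see parseGroup_fuel below).
-- Returns (flattened contents, suffix just past the matching ')');
-- 'none' = the 'raise SyntaxError' (outside Pre_next_branch).
def parseGroupF : Nat → List String → Option (List String × List String)
  | 0, _ => none
  | _ + 1, [] => none
  | fuel + 1, t :: rest =>
    if t = ")" then some ([], rest)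
    else if t = "(" then
      match parseGroupF fuel rest with
      | none => none
      | some (sub, rest') =>
        match parseGroupF fuel rest' with
        | none => none
        | some (out, rest'') => some (sub ++ out, rest'')
    else
      match parseGroupF fuel rest with
      | none => none
      | some (out, rest') => some (t :: out, rest')

def next_branch_alt (tokens : List String) : List String × Int :=
  match tokens with
  | [] => ([], 0)
  | t0 :: rest =>
    if t0 ≠ "(" then (tokens, (tokens.length : Int))
    else
      match parseGroupF rest.length rest with
      | none => ([], 0)   -- SyntaxError, outside Pre_
      | some (branch, _) => (branch, (branch.length : Int) + 2)

-- ===== PRECONDITION & SPEC =====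
-- Pre_ excludes exactly the inputs with an unmatched '(' at the front, on which
-- Python A (and Python B) raise SyntaxError: some prefix of tokens[1:] must close
-- the outer paren, i.e. contain one more ')' than '('.
def Pre_next_branch (tokens : List String) : Prop :=
  tokens = [] ∨ tokens.head? ≠ some "(" ∨
    ∃ n < (tokens.drop 1).length + 1,
      ((tokens.drop 1).take n).count ")" = ((tokens.drop 1).take n).count "(" + 1
instance (tokens : List String) : Decidable (Pre_next_branch tokens) := by
  unfold Pre_next_branch; infer_instance

def pvWitness_next_branch : List String := ["(", "C", ")"]

def Spec_next_branch (tokens : List String) (out : List String × Int) : Prop := out = next_branch_alt tokens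
instance (tokens : List String) (out : List String × Int) : Decidable (Spec_next_branch tokens out) := by unfold Spec_next_branch; infer_instance

-- ===== CLAIM (what is proved, stated in full; the proofs are below) =====
def Claim_equal_next_branch : Prop := ∀ (tokens : List String), Dom_next_branch tokens → Pre_next_branch tokens → Spec_next_branch tokens (next_branch tokens)

-- ===== LEMMAS AND PROOFS =====

-- the parser consumes at least the closing ')': the remainder is strictly shorter
theorem parseGroup_shrink : ∀ (fuel : Nat) (xs out rest : List String),
    parseGroupF fuel xs = some (out, rest) → rest.length < xs.length := by
  intro fuel
  induction fuel with
  | zero => intro xs out rest h; simp [parseGroupF] at h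
  | succ f ih =>
    intro xs out rest h
    match xs with
    | [] => simp [parseGroupF] at h
    | t :: r =>
      simp only [parseGroupF] at h
      split_ifs at h with h1 h2
      · cases h; simp
      · cases e1 : parseGroupF f r with
        | none => simp [e1] at h
        | some p1 =>
          obtain ⟨sub, r1⟩ := p1
          cases e2 : parseGroupF f r1 with
          | none => simp [e1, e2] at h
          | some p2 =>
            obtain ⟨o2, r2⟩ := p2
            simp [e1, e2] at h
            have s1 := ih r sub r1 e1
            have s2 := ih r1 o2 r2 e2
            simp [← h.2]; omega
      · cases e1 : parseGroupF f r with
        | none => simp [e1] at h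
        | some p1 =>
          obtain ⟨o1, r1⟩ := p1
          simp [e1] at h
          have s1 := ih r o1 r1 e1
          simp [← h.2]; omega

-- bridge: A's depth-counting loop equals B's recursive-descent parse; depth d
-- in A corresponds to finishing one group and continuing the loop at depth d-1.
theorem loop_eq_parse : ∀ (fuel : Nat) (xs : List String) (acc : List String) (d : Int),
    xs.length ≤ fuel → 1 ≤ d →
    nbLoopA xs d acc =
      match parseGroupF fuel xs with
      | none => none
      | some (out, rest) =>
        if d = 1 then some (acc ++ out, ((acc ++ out).length : Int) + 2)
        else nbLoopA rest (d - 1) (acc ++ out) := by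
  intro fuel
  induction fuel with
  | zero =>
    intro xs acc d hlen hd
    have hx : xs = [] := List.eq_nil_of_length_eq_zero (Nat.le_zero.mp hlen)
    subst hx; simp [nbLoopA, parseGroupF]
  | succ f ih =>
    intro xs acc d hlen hd
    match xs with
    | [] => simp [nbLoopA, parseGroupF]
    | t :: r =>
      have hr : r.length ≤ f := by simpa using hlen
      by_cases hpo : t = "("
      · -- '(' : A recurses at depth d+1; B parses the nested group, then continues
        subst hpo
        have L : nbLoopA ("(" :: r) d acc = nbLoopA r (d + 1) acc := by simp [nbLoopA]
        have R : parseGroupF (f + 1) ("(" :: r) =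
            (match parseGroupF f r with
             | none => none
             | some (sub, r1) =>
               match parseGroupF f r1 with
               | none => none
               | some (o, r2) => some (sub ++ o, r2)) := by
          simp [parseGroupF]
        rw [L, R, ih r acc (d + 1) hr (by omega)]
        cases e1 : parseGroupF f r with
        | none => simp
        | some p1 =>
          obtain ⟨sub, r1⟩ := p1
          have hne : ¬ (d + 1 = (1 : Int)) := by omega
          have hr1 : r1.length ≤ f := by
            have := parseGroup_shrink f r sub r1 e1; omega
          simp only [hne, if_false, add_sub_cancel_right]
          rw [ih r1 (acc ++ sub) d hr1 hd]
          cases e2 : parseGroupF f r1 with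
          | none => simp
          | some p2 =>
            obtain ⟨o2, r2⟩ := p2
            by_cases hd1 : d = 1 <;> simp [hd1, List.append_assoc]
      · by_cases hpc : t = ")"
        · -- ')' : close the current group
          subst hpc
          by_cases hd1 : d = 1
          · subst hd1; simp [nbLoopA, parseGroupF]
          · have hne : ¬ ((d : Int) - 1 = 0) := by omega
            simp [nbLoopA, parseGroupF, hne, hd1]
        · -- ordinary token: appended by A, cons'ed by B
          have L : nbLoopA (t :: r) d acc = nbLoopA r d (acc ++ [t]) := by
            simp [nbLoopA, hpo, hpc]
          rw [L, ih r (acc ++ [t]) d hr hd]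
          cases e1 : parseGroupF f r with
          | none => simp [parseGroupF, e1, hpo, hpc]
          | some p1 =>
            obtain ⟨o1, r1⟩ := p1
            simp only [parseGroupF, e1, if_neg hpo, if_neg hpc]
            by_cases hd1 : d = 1 <;> simp [hd1, List.append_assoc]

-- ===== VERDICT (by name: the statement is the Claim_ definition above) =====
theorem next_branch_spec : Claim_equal_next_branch := by
  intro tokens _ _
  unfold Spec_next_branch next_branch next_branch_alt
  match tokens with
  | [] => rfl
  | t0 :: rest =>
    by_cases h : t0 = "("
    · subst h
      simp only [ne_eq, not_true_eq_false, if_false]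
      rw [loop_eq_parse rest.length rest [] 1 (le_refl _) (le_refl _)]
      cases parseGroupF rest.length rest with
      | none => rfl
      | some p => obtain ⟨branch, r⟩ := p; simp
    · simp [h]
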